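-- pv_equiv track=rewrite | github.com/jwcherney/2022AdventOfCode | day18/day18.py | get_min_max_by_cube
-- ===== SOURCE A (Python) =====
-- def get_min_max_by_cube(cube_dots, cube_dot):
--     x, y, z = cube_dot
--     min_x = min([xx for xx, yy, zz in cube_dots if yy == y and zz == z])
--     max_x = max([xx for xx, yy, zz in cube_dots if yy == y and zz == z])
--     min_y = min([yy for xx, yy, zz in cube_dots if xx == x and zz == z])
--     max_y = max([yy for xx, yy, zz in cube_dots if xx == x and zz == z])
--     min_z = min([zz for xx, yy, zz in cube_dots if xx == x and yy == y])
--     max_z = max([zz for xx, yy, zz in cube_dots if xx == x and yy == y])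
--     return [(min_x, max_x), (min_y, max_y), (min_z, max_z)]
-- ===== SOURCE B (Python) =====
-- def get_min_max_by_cube(cube_dots, cube_dot):
--     x, y, z = cube_dot
--     bx = by = bz = None
--     for xx, yy, zz in cube_dots:
--         if yy == y and zz == z:
--             bx = (xx, xx) if bx is None else (min(bx[0], xx), max(bx[1], xx))
--         if xx == x and zz == z:
--             by = (yy, yy) if by is None else (min(by[0], yy), max(by[1], yy))
--         if xx == x and yy == y:
--             bz = (zz, zz) if bz is None else (min(bz[0], zz), max(bz[1], zz))
--     return [bx, by, bz]
-- ===== Notes on version B (the rewrite author's own statement) =====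
-- stated objective: alternative
-- what changed: Replaces A's six separate filtering comprehensions (each a full traversal, plus min/max scans) with a single pass maintaining running (min,max) accumulators for all three axes (fewer traversals, not measured).
-- outside the precondition, e.g. on get_min_max_by_cube([(0, 0, 0)], (1, 1, 1)): A raises ValueError, B returns [None, None, None]
import Mathlib
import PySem

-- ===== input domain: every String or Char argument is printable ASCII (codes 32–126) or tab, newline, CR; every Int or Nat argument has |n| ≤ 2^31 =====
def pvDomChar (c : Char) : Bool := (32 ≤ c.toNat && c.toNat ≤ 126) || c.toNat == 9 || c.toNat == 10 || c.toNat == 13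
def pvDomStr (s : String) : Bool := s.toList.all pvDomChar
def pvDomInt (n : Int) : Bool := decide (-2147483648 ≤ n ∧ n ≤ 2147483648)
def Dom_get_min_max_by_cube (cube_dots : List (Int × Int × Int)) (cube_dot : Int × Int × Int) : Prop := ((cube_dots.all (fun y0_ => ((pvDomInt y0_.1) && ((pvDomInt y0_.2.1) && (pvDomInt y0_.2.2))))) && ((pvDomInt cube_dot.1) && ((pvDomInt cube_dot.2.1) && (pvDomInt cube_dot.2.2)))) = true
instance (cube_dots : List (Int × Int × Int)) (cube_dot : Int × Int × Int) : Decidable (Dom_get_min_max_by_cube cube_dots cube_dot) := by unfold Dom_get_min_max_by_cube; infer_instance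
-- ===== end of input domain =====

-- B replaces A's six filtering comprehensions (six traversals plus min/max scans) with one
-- single pass keeping running (min,max) accumulators per axis; Pre_ excludes the inputs on
-- which A's min() raises ValueError (no point of cube_dots shares the required two coordinates).


-- ===== PORT A =====
-- Python's min(xs)/max(xs) is PySem.List.min?/max? (identity key); the .getD 0 totalises the
-- port exactly where Python raises ValueError on an empty list — those inputs are outside Pre_.
def get_min_max_by_cube (cube_dots : List (Int × Int × Int)) (cube_dot : Int × Int × Int) : List (Int × Int) :=
  let x := cube_dot.1
  let y := cube_dot.2.1
  let z := cube_dot.2.2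
  let min_x := ((PySem.List.min? ((cube_dots.filter (fun p => p.2.1 == y && p.2.2 == z)).map (fun p => p.1)) (fun v => v)).getD 0)
  let max_x := ((PySem.List.max? ((cube_dots.filter (fun p => p.2.1 == y && p.2.2 == z)).map (fun p => p.1)) (fun v => v)).getD 0)
  let min_y := ((PySem.List.min? ((cube_dots.filter (fun p => p.1 == x && p.2.2 == z)).map (fun p => p.2.1)) (fun v => v)).getD 0)
  let max_y := ((PySem.List.max? ((cube_dots.filter (fun p => p.1 == x && p.2.2 == z)).map (fun p => p.2.1)) (fun v => v)).getD 0)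
  let min_z := ((PySem.List.min? ((cube_dots.filter (fun p => p.1 == x && p.2.1 == y)).map (fun p => p.2.2)) (fun v => v)).getD 0)
  let max_z := ((PySem.List.max? ((cube_dots.filter (fun p => p.1 == x && p.2.1 == y)).map (fun p => p.2.2)) (fun v => v)).getD 0)
  [(min_x, max_x), (min_y, max_y), (min_z, max_z)]

-- ===== PORT B =====
-- '(xx, xx) if acc is None else (min(acc[0], xx), max(acc[1], xx))' from Source B
def pvUpd (acc : Option (Int × Int)) (v : Int) : Option (Int × Int) :=
  match acc with
  | none => some (v, v)
  | some (mn, mx) => some (min mn v, max mx v)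

-- single pass over cube_dots; the .getD (0, 0) totalises the 'None' Source B returns outside Pre_
def get_min_max_by_cube_alt (cube_dots : List (Int × Int × Int)) (cube_dot : Int × Int × Int) : List (Int × Int) :=
  let x := cube_dot.1
  let y := cube_dot.2.1
  let z := cube_dot.2.2
  let r := cube_dots.foldl
    (fun (s : Option (Int × Int) × Option (Int × Int) × Option (Int × Int)) p =>
      ((if p.2.1 == y && p.2.2 == z then pvUpd s.1 p.1 else s.1),
       (if p.1 == x && p.2.2 == z then pvUpd s.2.1 p.2.1 else s.2.1),
       (if p.1 == x && p.2.1 == y then pvUpd s.2.2 p.2.2 else s.2.2)))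
    (none, none, none)
  [r.1.getD (0, 0), r.2.1.getD (0, 0), r.2.2.getD (0, 0)]

-- ===== PRECONDITION & SPEC =====
-- Pre_ excludes exactly the inputs where some axis line through cube_dot meets no point of
-- cube_dots: there A's min() raises ValueError (Source B returns None entries there).
def Pre_get_min_max_by_cube (cube_dots : List (Int × Int × Int)) (cube_dot : Int × Int × Int) : Prop :=
  (∃ p ∈ cube_dots, p.2.1 = cube_dot.2.1 ∧ p.2.2 = cube_dot.2.2) ∧
  (∃ p ∈ cube_dots, p.1 = cube_dot.1 ∧ p.2.2 = cube_dot.2.2) ∧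
  (∃ p ∈ cube_dots, p.1 = cube_dot.1 ∧ p.2.1 = cube_dot.2.1)
instance (cube_dots : List (Int × Int × Int)) (cube_dot : Int × Int × Int) : Decidable (Pre_get_min_max_by_cube cube_dots cube_dot) := by unfold Pre_get_min_max_by_cube; infer_instance

def pvWitness_get_min_max_by_cube : (List (Int × Int × Int)) × (Int × Int × Int) :=
  ([(1, 2, 3), (5, 2, 3), (1, 7, 3), (1, 2, -4)], (1, 2, 3))

def Spec_get_min_max_by_cube (cube_dots : List (Int × Int × Int)) (cube_dot : Int × Int × Int) (out : List (Int × Int)) : Prop := out = get_min_max_by_cube_alt cube_dots cube_dot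
instance (cube_dots : List (Int × Int × Int)) (cube_dot : Int × Int × Int) (out : List (Int × Int)) : Decidable (Spec_get_min_max_by_cube cube_dots cube_dot out) := by unfold Spec_get_min_max_by_cube; infer_instance

-- ===== CLAIM (what is proved, stated in full; the proofs are below) =====
def Claim_equal_get_min_max_by_cube : Prop := ∀ (cube_dots : List (Int × Int × Int)) (cube_dot : Int × Int × Int), Dom_get_min_max_by_cube cube_dots cube_dot → Pre_get_min_max_by_cube cube_dots cube_dot → Spec_get_min_max_by_cube cube_dots cube_dot (get_min_max_by_cube cube_dots cube_dot)

-- ===== LEMMAS AND PROOFS =====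

-- B's three-accumulator fold splits into three independent folds
lemma pv_foldl_prod3 {α β γ δ : Type} (f : α → δ → α) (g : β → δ → β) (h : γ → δ → γ)
    (l : List δ) (a : α) (b : β) (c : γ) :
    l.foldl (fun s p => (f s.1 p, g s.2.1 p, h s.2.2 p)) (a, b, c) =
      (l.foldl f a, l.foldl g b, l.foldl h c) := by
  induction l generalizing a b c with
  | nil => rfl
  | cons p t ih => simp [List.foldl, ih]

-- a guarded-update fold over the raw list is the plain update fold over the filtered, projected list
lemma pv_foldl_if_upd {δ : Type} (pred : δ → Bool) (proj : δ → Int) (l : List δ)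
    (a : Option (Int × Int)) :
    l.foldl (fun s p => if pred p then pvUpd s (proj p) else s) a =
      ((l.filter pred).map proj).foldl pvUpd a := by
  induction l generalizing a with
  | nil => rfl
  | cons p t ih => by_cases hp : pred p <;> simp [List.foldl, hp, ih]

lemma pv_foldl_upd_some (t : List Int) (mn mx : Int) :
    t.foldl pvUpd (some (mn, mx)) = some (t.foldl min mn, t.foldl max mx) := by
  induction t generalizing mn mx with
  | nil => rfl
  | cons v t ih => simp [List.foldl, pvUpd, ih]

-- one axis: B's accumulator agrees with A's (min, max) of the filtered, projected list
lemma pv_axis_eq {δ : Type} (pred : δ → Bool) (proj : δ → Int) (l : List δ)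
    (h : ∃ p ∈ l, pred p = true) :
    (((PySem.List.min? ((l.filter pred).map proj) (fun v => v)).getD 0),
     ((PySem.List.max? ((l.filter pred).map proj) (fun v => v)).getD 0)) =
      (l.foldl (fun s p => if pred p then pvUpd s (proj p) else s) none).getD (0, 0) := by
  rw [pv_foldl_if_upd]
  obtain ⟨p, hp, hpred⟩ := h
  have hne : (l.filter pred).map proj ≠ [] := by
    simp only [ne_eq, List.map_eq_nil_iff, List.filter_eq_nil_iff, not_forall]
    exact ⟨p, hp, by simp [hpred]⟩
  cases hlst : (l.filter pred).map proj with
  | nil => exact absurd hlst hne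
  | cons xh xt =>
    rw [PySem.List.min?_id_cons, PySem.List.max?_id_cons]
    simp [List.foldl, pvUpd, pv_foldl_upd_some]

-- the specialised instance of pv_foldl_prod3 for B's loop body (stated verbatim so rw matches)
lemma pv_split (x y z : Int) (l : List (Int × Int × Int)) :
    l.foldl
      (fun (s : Option (Int × Int) × Option (Int × Int) × Option (Int × Int)) p =>
        ((if p.2.1 == y && p.2.2 == z then pvUpd s.1 p.1 else s.1),
         (if p.1 == x && p.2.2 == z then pvUpd s.2.1 p.2.1 else s.2.1),
         (if p.1 == x && p.2.1 == y then pvUpd s.2.2 p.2.2 else s.2.2)))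
      (none, none, none) =
    (l.foldl (fun s p => if p.2.1 == y && p.2.2 == z then pvUpd s p.1 else s) none,
     l.foldl (fun s p => if p.1 == x && p.2.2 == z then pvUpd s p.2.1 else s) none,
     l.foldl (fun s p => if p.1 == x && p.2.1 == y then pvUpd s p.2.2 else s) none) :=
  pv_foldl_prod3 (fun s p => if p.2.1 == y && p.2.2 == z then pvUpd s p.1 else s)
    (fun s p => if p.1 == x && p.2.2 == z then pvUpd s p.2.1 else s)
    (fun s p => if p.1 == x && p.2.1 == y then pvUpd s p.2.2 else s) l none none none

-- ===== VERDICT (by name: the statement is the Claim_ definition above) =====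
theorem get_min_max_by_cube_spec : Claim_equal_get_min_max_by_cube := by
  intro cds cd _ hpre
  obtain ⟨h1, h2, h3⟩ := hpre
  show _ = _
  simp only [get_min_max_by_cube, get_min_max_by_cube_alt]
  rw [pv_split,
      ← pv_axis_eq (fun p => p.2.1 == cd.2.1 && p.2.2 == cd.2.2) (fun p => p.1) cds
        (by obtain ⟨p, hp, e1, e2⟩ := h1; exact ⟨p, hp, by simp [e1, e2]⟩),
      ← pv_axis_eq (fun p => p.1 == cd.1 && p.2.2 == cd.2.2) (fun p => p.2.1) cds
        (by obtain ⟨p, hp, e1, e2⟩ := h2; exact ⟨p, hp, by simp [e1, e2]⟩),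
      ← pv_axis_eq (fun p => p.1 == cd.1 && p.2.1 == cd.2.1) (fun p => p.2.2) cds
        (by obtain ⟨p, hp, e1, e2⟩ := h3; exact ⟨p, hp, by simp [e1, e2]⟩)]
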